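-- pv_equiv track=rewrite | github.com/xaved88/bottled_ai | rs/helper/seed.py | make_seed_string_number
-- ===== SOURCE A (Python) =====
-- def make_seed_string_number(seed: str) -> float:
--     total = 0
--     seed_str = seed.upper().replace("O", "0")
--     chars = "0123456789ABCDEFGHIJKLMNPQRSTUVWXYZ"
--     for c in seed_str:
--         if c not in chars:
--             raise Exception("Bad Seed!")
--         r = chars.index(c)
--         total *= len(chars)
--         total += r
--     return total
-- ===== SOURCE B (Python) =====
-- def make_seed_string_number(seed: str) -> int:
--     chars = "0123456789ABCDEFGHIJKLMNPQRSTUVWXYZ"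
--     digits = []
--     for c in seed.upper().replace("O", "0"):
--         if c not in chars:
--             raise Exception("Bad Seed!")
--         digits.append(chars.index(c))
--     total = 0
--     place = 1
--     for d in reversed(digits):
--         total += d * place
--         place *= len(chars)
--     return total
-- ===== Notes on version B (the rewrite author's own statement) =====
-- stated objective: alternative
-- what changed: Two-phase decomposition: first collect the digit values into a list, then accumulate the total back-to-front over the reversed digit list with an explicit running place-value counter, instead of A's single-pass multiply-then-add Horner loop.
import Mathlib
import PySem

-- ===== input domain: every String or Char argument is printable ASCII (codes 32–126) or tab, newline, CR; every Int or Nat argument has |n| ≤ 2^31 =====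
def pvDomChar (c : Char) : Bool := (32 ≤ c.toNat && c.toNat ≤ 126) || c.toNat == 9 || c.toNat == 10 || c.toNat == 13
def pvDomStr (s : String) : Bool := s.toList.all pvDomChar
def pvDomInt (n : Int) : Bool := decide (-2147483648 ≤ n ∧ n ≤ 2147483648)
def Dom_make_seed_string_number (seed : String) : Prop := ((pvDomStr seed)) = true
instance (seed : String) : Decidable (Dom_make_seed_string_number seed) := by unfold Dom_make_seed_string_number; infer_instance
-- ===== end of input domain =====

-- B changes the decomposition (digit list first, then a reversed place-value accumulation) instead of
-- A's single Horner loop; same O(n) cost, objective: alternative.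

-- ===== PORT A =====
def pvAlph : List Char := "0123456789ABCDEFGHIJKLMNPQRSTUVWXYZ".toList

-- chars.index(c) for a single char c; under Pre_ the char is present, so getD 0 is never taken
-- (the raise branch of A is exactly the complement of Pre_).
def pvDig (c : Char) : Int := ((PySem.List.index? pvAlph c).getD 0 : Nat)

def make_seed_string_number (seed : String) : Int :=
  (PySem.Chars.replace (PySem.Chars.upper seed.toList) ['O'] ['0']).foldl
    (fun total c => total * (pvAlph.length : Int) + pvDig c) 0

-- ===== PORT B =====
def make_seed_string_number_alt (seed : String) : Int :=
  let digits := (PySem.Chars.replace (PySem.Chars.upper seed.toList) ['O'] ['0']).map pvDig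
  (digits.reverse.foldl
      (fun (tp : Int × Int) d => (tp.1 + d * tp.2, tp.2 * (pvAlph.length : Int))) (0, 1)).1

-- ===== PRECONDITION & SPEC =====
-- Pre_ excludes exactly the seeds on which A (and B) raise an exception: some character of the
-- uppercased, O→0-folded string is not in the 35-char alphabet.
def Pre_make_seed_string_number (seed : String) : Prop :=
  ((PySem.Chars.replace (PySem.Chars.upper seed.toList) ['O'] ['0']).all
    (fun c => decide (c ∈ pvAlph))) = true
instance (seed : String) : Decidable (Pre_make_seed_string_number seed) := by
  unfold Pre_make_seed_string_number; infer_instance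
def pvWitness_make_seed_string_number : String := "aO3Z"

def Spec_make_seed_string_number (seed : String) (out : Int) : Prop := out = make_seed_string_number_alt seed
instance (seed : String) (out : Int) : Decidable (Spec_make_seed_string_number seed out) := by unfold Spec_make_seed_string_number; infer_instance

-- ===== CLAIM (what is proved, stated in full; the proofs are below) =====
def Claim_equal_make_seed_string_number : Prop := ∀ (seed : String), Dom_make_seed_string_number seed → Pre_make_seed_string_number seed → Spec_make_seed_string_number seed (make_seed_string_number seed)

-- ===== LEMMAS AND PROOFS =====

-- Horner's left fold equals the reversed place-value fold: combined invariant on an arbitrary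
-- digit list ds and Horner accumulator a (L is the base).
lemma pv_key (L : Int) (ds : List Int) : ∀ a : Int,
    ds.foldl (fun t d => t * L + d) a
      = a * L ^ ds.length + (ds.foldr (fun d (tp : Int × Int) => (tp.1 + d * tp.2, tp.2 * L)) (0, 1)).1
    ∧ (ds.foldr (fun d (tp : Int × Int) => (tp.1 + d * tp.2, tp.2 * L)) (0, 1)).2 = L ^ ds.length := by
  induction ds with
  | nil => intro a; simp
  | cons d ds ih =>
    intro a
    obtain ⟨h1, h2⟩ := ih (a * L + d)
    refine ⟨?_, ?_⟩
    · simp only [List.foldl_cons, List.foldr_cons, h1, h2, List.length_cons]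
      ring
    · simp only [List.foldr_cons, h2, List.length_cons]
      ring

-- ===== VERDICT (by name: the statement is the Claim_ definition above) =====
theorem make_seed_string_number_spec : Claim_equal_make_seed_string_number := by
  intro seed _ _
  unfold Spec_make_seed_string_number make_seed_string_number make_seed_string_number_alt
  simp only [List.foldl_reverse]
  have h := (pv_key (pvAlph.length : Int)
      ((PySem.Chars.replace (PySem.Chars.upper seed.toList) ['O'] ['0']).map pvDig) 0).1
  simp only [List.foldl_map] at h
  simpa using h
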